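-- pv_equiv track=rewrite | github.com/drybell/leetcode | 2025/sudoku_solver.py | find_unique_pairs
-- ===== SOURCE A (Python) =====
-- square_idxs = [
--       (0, 0), (0, 3), (0, 6)
--     , (3, 0), (3, 3), (3, 6)
--     , (6, 0), (6, 3), (6, 6)
-- ]
--
-- def find_unique_pairs(target, squares, l, r, board):
--     opts  = []
--
--     def traverse(left, right, square, temp):
--         if len(temp) == target:
--             opts.append(temp)
--             return
--
--         ic,   jc   = square_idxs[squares[square]]
--         imax, jmax = ic + 2, jc + 2
--
--         for i, ileft in enumerate(left):
--             for j, jright in enumerate(right):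
--                 if board[ileft][jright] != -1:
--                     continue
--
--                 if ic <= ileft <= imax and jc <= jright <= jmax:
--                     l = list(left)
--                     l.pop(i)
--
--                     r = list(right)
--                     r.pop(j)
--
--                     traverse(
--                         l, r
--                         , square + 1
--                         , [*temp, (ileft, jright)]
--                     )
--
--     traverse(l, r, 0, [])
--
--     return opts
-- ===== SOURCE B (Python) =====
-- square_idxs = [
--       (0, 0), (0, 3), (0, 6)
--     , (3, 0), (3, 3), (3, 6)
--     , (6, 0), (6, 3), (6, 6)
-- ]
--
-- def find_unique_pairs(target, squares, l, r, board):
--     # Iterative breadth-first, level-by-level expansion of partial assignments.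
--     # All complete assignments have exactly `target` cells, so the level order
--     # at the final level coincides with the recursion's depth-first order.
--     states = [(l, r, [])]
--     depth = 0
--     while states and depth != target:
--         ic, jc = square_idxs[squares[depth]]
--         imax, jmax = ic + 2, jc + 2
--         nxt = []
--         for left, right, temp in states:
--             for i, x in enumerate(left):
--                 for j, y in enumerate(right):
--                     if board[x][y] != -1:
--                         continue
--                     if ic <= x <= imax and jc <= y <= jmax:
--                         nxt.append((left[:i] + left[i+1:],
--                                     right[:j] + right[j+1:],
--                                     temp + [(x, y)]))
--         states = nxt
--         depth += 1
--     return [temp for _, _, temp in states]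
-- ===== Notes on version B (the rewrite author's own statement) =====
-- stated objective: alternative
-- what changed: Replaces the nested-function depth-first recursion (with a closed-over accumulator) by an iterative breadth-first, level-by-level expansion of a worklist of partial states (left, right, temp); since all results are emitted at the same depth `target`, the level order equals the recursion's output order.
import Mathlib
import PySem

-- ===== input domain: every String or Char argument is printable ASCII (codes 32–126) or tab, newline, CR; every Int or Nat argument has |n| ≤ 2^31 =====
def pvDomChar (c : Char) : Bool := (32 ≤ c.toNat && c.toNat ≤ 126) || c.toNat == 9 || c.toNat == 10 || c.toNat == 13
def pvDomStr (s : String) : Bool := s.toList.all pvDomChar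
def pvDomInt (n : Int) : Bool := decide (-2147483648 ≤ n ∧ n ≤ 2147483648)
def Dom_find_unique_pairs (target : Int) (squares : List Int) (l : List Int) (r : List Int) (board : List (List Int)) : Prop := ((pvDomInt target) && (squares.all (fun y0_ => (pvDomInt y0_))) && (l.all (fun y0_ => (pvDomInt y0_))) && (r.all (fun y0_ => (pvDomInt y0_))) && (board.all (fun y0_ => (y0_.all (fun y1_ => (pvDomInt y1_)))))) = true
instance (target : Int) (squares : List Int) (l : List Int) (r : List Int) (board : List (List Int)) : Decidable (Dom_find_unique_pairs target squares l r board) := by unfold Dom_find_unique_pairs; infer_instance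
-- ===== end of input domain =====

-- B replaces A's depth-first recursion by an iterative breadth-first, level-by-level
-- expansion of a worklist of partial states (objective: alternative, same cost).

-- the module-level constant `square_idxs` (shared by both Pythons)
def pv_square_idxs : List (Int × Int) :=
  [(0, 0), (0, 3), (0, 6), (3, 0), (3, 3), (3, 6), (6, 0), (6, 3), (6, 6)]

-- `square_idxs[squares[square]]` — the `.getD` defaults replace Python's IndexError
-- and are never reached inside Pre_find_unique_pairs
def pvSquareBox (squares : List Int) (square : Int) : Int × Int :=
  (PySem.List.pyGet? pv_square_idxs ((PySem.List.pyGet? squares square).getD 0)).getD (0, 0)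

-- `board[x][y]` — the `.getD` defaults replace Python's IndexError, never reached inside Pre_
def pvCell (board : List (List Int)) (x y : Int) : Int :=
  (PySem.List.pyGet? ((PySem.List.pyGet? board x).getD []) y).getD 0

-- ===== PORT A =====
-- the nested `traverse`; `fuel` is only a totality guard: every recursive call pops one
-- element of `left`, so with fuel = left.length + 1 the 0-case is never reached.
-- `l = list(left); l.pop(i)` is `pop?` at the in-range enumerate index (never raises in Python).
def pvTravA (target : Int) (squares : List Int) (board : List (List Int)) :
    Nat → List Int → List Int → Int → List (Int × Int) → List (List (Int × Int))
  | 0, _, _, _, _ => []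
  | fuel + 1, left, right, square, temp =>
    if (temp.length : Int) = target then [temp]
    else
      let p := pvSquareBox squares square
      let imax := p.1 + 2
      let jmax := p.2 + 2
      (PySem.List.enumerate left).foldl (fun acc ij =>
        (PySem.List.enumerate right).foldl (fun acc2 jj =>
          if pvCell board ij.2 jj.2 ≠ -1 then acc2
          else if p.1 ≤ ij.2 ∧ ij.2 ≤ imax ∧ p.2 ≤ jj.2 ∧ jj.2 ≤ jmax then
            acc2 ++ pvTravA target squares board fuel
              ((PySem.List.pop? left ij.1).getD (0, [])).2
              ((PySem.List.pop? right jj.1).getD (0, [])).2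
              (square + 1) (temp ++ [(ij.2, jj.2)])
          else acc2) acc) []

def find_unique_pairs (target : Int) (squares : List Int) (l : List Int) (r : List Int) (board : List (List Int)) : List (List (Int × Int)) :=
  pvTravA target squares board (l.length + 1) l r 0 []

-- ===== PORT B =====
-- one level of Source B's while-loop body: expand every state of the worklist
def pvStepB (squares : List Int) (board : List (List Int)) (depth : Int)
    (states : List (List Int × List Int × List (Int × Int))) :
    List (List Int × List Int × List (Int × Int)) :=
  let p := pvSquareBox squares depth
  let imax := p.1 + 2
  let jmax := p.2 + 2
  states.foldl (fun acc st =>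
    (PySem.List.enumerate st.1).foldl (fun acc2 ij =>
      (PySem.List.enumerate st.2.1).foldl (fun acc3 jj =>
        if pvCell board ij.2 jj.2 ≠ -1 then acc3
        else if p.1 ≤ ij.2 ∧ ij.2 ≤ imax ∧ p.2 ≤ jj.2 ∧ jj.2 ≤ jmax then
          acc3 ++ [(PySem.List.slice st.1 none (some ij.1) ++ PySem.List.slice st.1 (some (ij.1 + 1)) none,
                    PySem.List.slice st.2.1 none (some jj.1) ++ PySem.List.slice st.2.1 (some (jj.1 + 1)) none,
                    st.2.2 ++ [(ij.2, jj.2)])]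
        else acc3) acc2) acc) []

-- Source B's `while states and depth != target`; `fuel` is only a totality guard: each level
-- shortens every state's `left` by one, so the worklist is empty before fuel runs out.
def pvLoopB (target : Int) (squares : List Int) (board : List (List Int)) :
    Nat → Int → List (List Int × List Int × List (Int × Int)) →
    List (List Int × List Int × List (Int × Int))
  | 0, _, states => states
  | fuel + 1, depth, states =>
    if states ≠ [] ∧ depth ≠ target then
      pvLoopB target squares board fuel (depth + 1) (pvStepB squares board depth states)
    else states

def find_unique_pairs_alt (target : Int) (squares : List Int) (l : List Int) (r : List Int) (board : List (List Int)) : List (List (Int × Int)) :=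
  (pvLoopB target squares board (l.length + 1) 0 [(l, r, [])]).map (fun st => st.2.2)

-- ===== PRECONDITION & SPEC =====

-- Declarative characterisation of the recursion reaching depth d: some sequence of d
-- cells, whose rows are d distinct positions of l (in some order) and whose columns are
-- d distinct positions of r, with each cell free (-1) and inside the k-th square's box.
def pvReach (squares : List Int) (l : List Int) (r : List Int) (board : List (List Int)) (d : Nat) : Bool :=
  ((l.sublistsLen d).flatMap List.permutations).any (fun xs =>
    ((r.sublistsLen d).flatMap List.permutations).any (fun ys =>
      (List.range d).all (fun k =>
        pvCell board (xs.getD k 0) (ys.getD k 0) == -1 &&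
        decide ((pvSquareBox squares (k : Int)).1 ≤ xs.getD k 0) &&
        decide (xs.getD k 0 ≤ (pvSquareBox squares (k : Int)).1 + 2) &&
        decide ((pvSquareBox squares (k : Int)).2 ≤ ys.getD k 0) &&
        decide (ys.getD k 0 ≤ (pvSquareBox squares (k : Int)).2 + 2))))

-- Excludes exactly the inputs on which the Python A raises IndexError: a
-- board[x][y] lookup out of range (scanned whenever target ≠ 0 and both lists are
-- nonempty), or squares[d] / square_idxs[squares[d]] out of range at a depth d the
-- recursion actually reaches non-terminally (d = 0, or d ≥ 1 with pvReach).
def Pre_find_unique_pairs (target : Int) (squares : List Int) (l : List Int) (r : List Int) (board : List (List Int)) : Prop :=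
  target = 0 ∨
    ((0 < squares.length ∧ -9 ≤ squares.getD 0 0 ∧ squares.getD 0 0 < 9) ∧
     (∀ x ∈ l, ∀ y ∈ r, PySem.Raise.InRange board.length x ∧
        PySem.Raise.InRange ((PySem.List.pyGet? board x).getD []).length y) ∧
     (∀ d ∈ List.range (min l.length r.length + 1), 1 ≤ d → ((d : Int) < target ∨ target < 0) →
        ((d < squares.length ∧ -9 ≤ squares.getD d 0 ∧ squares.getD d 0 < 9) ∨
          pvReach squares l r board d = false)))
instance (target : Int) (squares : List Int) (l : List Int) (r : List Int) (board : List (List Int)) : Decidable (Pre_find_unique_pairs target squares l r board) := by unfold Pre_find_unique_pairs; infer_instance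

def pvWitness_find_unique_pairs : Int × List Int × List Int × List Int × List (List Int) :=
  (1, [0], [0], [0], [[-1]])

def Spec_find_unique_pairs (target : Int) (squares : List Int) (l : List Int) (r : List Int) (board : List (List Int)) (out : List (List (Int × Int))) : Prop := out = find_unique_pairs_alt target squares l r board
instance (target : Int) (squares : List Int) (l : List Int) (r : List Int) (board : List (List Int)) (out : List (List (Int × Int))) : Decidable (Spec_find_unique_pairs target squares l r board out) := by unfold Spec_find_unique_pairs; infer_instance

-- ===== CLAIM (what is proved, stated in full; the proofs are below) =====
def Claim_equal_find_unique_pairs : Prop := ∀ (target : Int) (squares : List Int) (l : List Int) (r : List Int) (board : List (List Int)), Dom_find_unique_pairs target squares l r board → Pre_find_unique_pairs target squares l r board → Spec_find_unique_pairs target squares l r board (find_unique_pairs target squares l r board)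

-- ===== LEMMAS AND PROOFS =====

-- 'skip or append' loop bodies are 'append a conditional block'
lemma pv_if_body {β : Type} (c b : Prop) [Decidable c] [Decidable b] (a X : List β) :
    (if c then a else if b then a ++ X else a) = a ++ (if c then [] else if b then X else []) := by
  split_ifs <;> simp

-- xs[:k] + xs[k+1:] is xs.pop(k), for an in-range index k
lemma pv_slice_pop (xs : List Int) (k : Nat) (h : k < xs.length) :
    PySem.List.slice xs none (some (k : Int)) ++ PySem.List.slice xs (some ((k : Int) + 1)) none
      = ((PySem.List.pop? xs (k : Int)).getD (0, [])).2 := by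
  rw [PySem.List.slice_to_natCast, show ((k : Int) + 1) = ((k + 1 : Nat) : Int) by push_cast; ring,
    PySem.List.slice_from_natCast, PySem.List.pop?_natCast xs k h]
  simp [List.eraseIdx_eq_take_drop_succ]

-- the children of one partial state at a given square, in enumeration order
def pvExpand (squares : List Int) (board : List (List Int)) (square : Int)
    (st : List Int × List Int × List (Int × Int)) :
    List (List Int × List Int × List (Int × Int)) :=
  let p := pvSquareBox squares square
  (PySem.List.enumerate st.1).flatMap (fun ij =>
    (PySem.List.enumerate st.2.1).flatMap (fun jj =>
      if pvCell board ij.2 jj.2 ≠ -1 then []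
      else if p.1 ≤ ij.2 ∧ ij.2 ≤ p.1 + 2 ∧ p.2 ≤ jj.2 ∧ jj.2 ≤ p.2 + 2 then
        [(((PySem.List.pop? st.1 ij.1).getD (0, [])).2,
          ((PySem.List.pop? st.2.1 jj.1).getD (0, [])).2,
          st.2.2 ++ [(ij.2, jj.2)])]
      else []))

-- A's nested loops at a non-terminal node: children, each recursed on, concatenated
lemma pvTravA_succ (target : Int) (squares : List Int) (board : List (List Int))
    (fuel : Nat) (left right : List Int) (square : Int) (temp : List (Int × Int))
    (h : ¬ ((temp.length : Int) = target)) :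
    pvTravA target squares board (fuel + 1) left right square temp
      = (pvExpand squares board square (left, right, temp)).flatMap
          (fun c => pvTravA target squares board fuel c.1 c.2.1 (square + 1) c.2.2) := by
  simp only [pvTravA, if_neg h, pv_if_body, PySem.List.foldl_append_eq_flatMap, List.nil_append,
    pvExpand, List.flatMap_assoc]
  congr 1; funext ij; congr 1; funext jj
  split_ifs <;> simp

-- a terminal node emits its assignment
lemma pvTravA_term (target : Int) (squares : List Int) (board : List (List Int))
    (fuel : Nat) (left right : List Int) (square : Int) (temp : List (Int × Int))
    (h : (temp.length : Int) = target) :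
    pvTravA target squares board (fuel + 1) left right square temp = [temp] := by
  simp [pvTravA, h]

-- B's level step is: the children of every state of the worklist, concatenated
lemma pvStepB_eq (squares : List Int) (board : List (List Int)) (depth : Int)
    (states : List (List Int × List Int × List (Int × Int))) :
    pvStepB squares board depth states = states.flatMap (pvExpand squares board depth) := by
  simp only [pvStepB, pv_if_body, PySem.List.foldl_append_eq_flatMap, List.nil_append]
  refine List.flatMap_congr ?_
  intro st _
  unfold pvExpand
  refine List.flatMap_congr ?_
  intro ij hij
  refine List.flatMap_congr ?_
  intro jj hjj
  rcases (PySem.List.mem_enumerate_iff _ _ _).1 hij with ⟨k, hk, rfl⟩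
  rcases (PySem.List.mem_enumerate_iff _ _ _).1 hjj with ⟨m, hm, rfl⟩
  simp only [zero_add]
  rw [pv_slice_pop st.1 k hk, pv_slice_pop st.2.1 m hm]

-- a child has one `left` element fewer and one assigned cell more
lemma pv_mem_expand (squares : List Int) (board : List (List Int)) (square : Int)
    (st c : List Int × List Int × List (Int × Int))
    (hc : c ∈ pvExpand squares board square st) :
    c.1.length + 1 = st.1.length ∧ c.2.2.length = st.2.2.length + 1 := by
  simp only [pvExpand, List.mem_flatMap] at hc
  obtain ⟨ij, hij, jj, hjj, hc⟩ := hc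
  rcases (PySem.List.mem_enumerate_iff _ _ _).1 hij with ⟨k, hk, rfl⟩
  rcases (PySem.List.mem_enumerate_iff _ _ _).1 hjj with ⟨m, hm, rfl⟩
  simp only [zero_add] at hc
  split_ifs at hc with h1 h2
  · simp at hc
  · rw [List.mem_singleton] at hc
    subst hc
    rw [PySem.List.pop?_natCast st.1 k hk]
    simp [List.length_eraseIdx, hk]
    omega
  · simp at hc

-- expanding a state with empty `left` gives nothing
lemma pv_expand_nil (squares : List Int) (board : List (List Int)) (square : Int)
    (st : List Int × List Int × List (Int × Int)) (h : st.1 = []) :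
    pvExpand squares board square st = [] := by
  simp [pvExpand, h]

-- the two equations of Source B's while loop
lemma pvLoopB_step (target : Int) (squares : List Int) (board : List (List Int))
    (fuel : Nat) (depth : Int) (states : List (List Int × List Int × List (Int × Int)))
    (h : states ≠ [] ∧ depth ≠ target) :
    pvLoopB target squares board (fuel + 1) depth states
      = pvLoopB target squares board fuel (depth + 1) (pvStepB squares board depth states) := by
  rw [pvLoopB, if_pos h]

lemma pvLoopB_stop (target : Int) (squares : List Int) (board : List (List Int))
    (fuel : Nat) (depth : Int) (states : List (List Int × List Int × List (Int × Int)))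
    (h : ¬ (states ≠ [] ∧ depth ≠ target)) :
    pvLoopB target squares board (fuel + 1) depth states = states := by
  rw [pvLoopB, if_neg h]

-- the BFS worklist vs the DFS recursion: on a worklist of states of uniform shape
-- (left length n, temp length = depth), B's remaining loop output equals the
-- concatenation of A's subtree outputs
lemma pv_main (target : Int) (squares : List Int) (board : List (List Int)) :
    ∀ (n : Nat) (depth : Int) (states : List (List Int × List Int × List (Int × Int))),
      (∀ st ∈ states, st.1.length = n ∧ (st.2.2.length : Int) = depth) →
      (pvLoopB target squares board (n + 1) depth states).map (fun st => st.2.2)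
        = states.flatMap (fun st => pvTravA target squares board (n + 1) st.1 st.2.1 depth st.2.2) := by
  intro n
  induction n with
  | zero =>
    intro depth states hinv
    by_cases hs : states = []
    · subst hs; simp [pvLoopB]
    by_cases hd : depth = target
    · have : ¬ (states ≠ [] ∧ depth ≠ target) := by simp [hd]
      rw [pvLoopB_stop _ _ _ _ _ _ this]
      rw [List.map_eq_flatMap]
      refine (List.flatMap_congr ?_).symm
      intro st hst
      exact pvTravA_term _ _ _ _ _ _ _ _ ((hinv st hst).2.trans hd)
    · rw [pvLoopB_step _ _ _ _ _ _ (And.intro hs hd)]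
      rw [show pvLoopB target squares board 0 (depth + 1) (pvStepB squares board depth states) = pvStepB squares board depth states from rfl, pvStepB_eq]
      have hL : (states.flatMap (pvExpand squares board depth)).map (fun st => st.2.2)
          = states.flatMap (fun st => []) := by
        rw [List.map_flatMap]
        refine List.flatMap_congr ?_
        intro st hst
        rw [pv_expand_nil squares board depth st (List.length_eq_zero_iff.1 (hinv st hst).1)]
        rfl
      rw [hL]
      refine (List.flatMap_congr ?_).symm
      intro st hst
      rw [pvTravA_succ _ _ _ _ _ _ _ _ (fun h => hd ((hinv st hst).2.symm.trans h)),
        pv_expand_nil squares board depth st (List.length_eq_zero_iff.1 (hinv st hst).1)]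
      rfl
  | succ m ih =>
    intro depth states hinv
    by_cases hs : states = []
    · subst hs; simp [pvLoopB]
    by_cases hd : depth = target
    · have : ¬ (states ≠ [] ∧ depth ≠ target) := by simp [hd]
      rw [pvLoopB_stop _ _ _ _ _ _ this]
      rw [List.map_eq_flatMap]
      refine (List.flatMap_congr ?_).symm
      intro st hst
      exact pvTravA_term _ _ _ _ _ _ _ _ ((hinv st hst).2.trans hd)
    · rw [pvLoopB_step _ _ _ _ _ _ (And.intro hs hd)]
      have hinv' : ∀ st ∈ pvStepB squares board depth states,
          st.1.length = m ∧ (st.2.2.length : Int) = depth + 1 := by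
        intro c hc
        rw [pvStepB_eq] at hc
        rcases List.mem_flatMap.1 hc with ⟨st, hst, hcst⟩
        have h1 := pv_mem_expand squares board depth st c hcst
        have h2 := hinv st hst
        constructor
        · omega
        · rw [h1.2]; push_cast; rw [h2.2]
      rw [ih (depth + 1) (pvStepB squares board depth states) hinv', pvStepB_eq,
        List.flatMap_assoc]
      refine (List.flatMap_congr ?_).symm
      intro st hst
      exact pvTravA_succ _ _ _ _ _ _ _ _ (fun h => hd ((hinv st hst).2.symm.trans h))

-- ===== VERDICT (by name: the statement is the Claim_ definition above) =====
theorem find_unique_pairs_spec : Claim_equal_find_unique_pairs := by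
  intro target squares l r board _ _
  unfold Spec_find_unique_pairs find_unique_pairs find_unique_pairs_alt
  have h := pv_main target squares board l.length 0 [(l, r, [])]
    (by intro st hst; simp at hst; simp [hst])
  rw [h]
  simp
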